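-- pv_equiv track=rewrite | github.com/Michal0ss/WDI | WDI_algo/Zestaw_3/z101.py | check_column_for_0
-- ===== SOURCE A (Python) =====
-- def check_column_for_0(t):
--     """sprawdza czy w tablicy t w kazdej kolumnie wystepuje co najmniej jedno 0 """
--     n=len(t)
--     for i in range(n):
--         found=False
--         for j in range(n):
--             if t[j][i] == 0:
--                 found=True
--                 break
--         if not found:
--             return False
--     return True
-- ===== SOURCE B (Python) =====
-- def check_column_for_0(t):
--     """sprawdza czy w tablicy t w kazdej kolumnie wystepuje co najmniej jedno 0 """
--     n = len(t)
--     has_zero = [False] * n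
--     for row in t:
--         for i, v in enumerate(row[:n]):
--             if v == 0:
--                 has_zero[i] = True
--     return all(has_zero)
-- ===== Notes on version B (the rewrite author's own statement) =====
-- stated objective: alternative
-- what changed: Replaces A's column-major nested scan (for each column, rescan the rows until a zero) by a single row-major pass that marks in a boolean array which columns have seen a zero, then checks all marks.
import Mathlib
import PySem

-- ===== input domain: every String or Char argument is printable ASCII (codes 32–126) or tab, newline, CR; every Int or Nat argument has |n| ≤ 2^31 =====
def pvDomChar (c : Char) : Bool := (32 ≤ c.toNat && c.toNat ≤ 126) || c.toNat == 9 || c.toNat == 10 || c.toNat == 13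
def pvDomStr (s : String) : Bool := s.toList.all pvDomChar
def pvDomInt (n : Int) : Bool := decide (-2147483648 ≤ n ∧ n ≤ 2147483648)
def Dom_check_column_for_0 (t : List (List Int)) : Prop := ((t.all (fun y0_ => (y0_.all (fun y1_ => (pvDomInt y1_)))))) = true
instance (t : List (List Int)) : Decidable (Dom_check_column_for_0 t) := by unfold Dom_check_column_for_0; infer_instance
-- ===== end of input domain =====

-- B replaces A's column-major nested scan by one row-major pass marking a boolean
-- array of columns that have seen a zero (objective: alternative decomposition, same cost).

-- ===== PORT A =====
-- inner loop 'for j in range(n): if t[j][i] == 0: found=True; break'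
-- (out-of-range access raises in Python and is excluded by Pre_; the port reads
--  a harmless nonzero default there, exact inside Pre_)
def pvAFound (t : List (List Int)) (i : Int) : List Int → Bool
  | [] => false
  | j :: js =>
      if PySem.List.pyGetD (PySem.List.pyGetD t j []) i 1 == 0 then true
      else pvAFound t i js

-- outer loop 'for i in range(n): … if not found: return False'
def pvAOuter (t : List (List Int)) (n : Int) : List Int → Bool
  | [] => true
  | i :: is => if pvAFound t i (PySem.List.pyRange 0 n 1) then pvAOuter t n is else false

def check_column_for_0 (t : List (List Int)) : Bool :=
  pvAOuter t (t.length : Int) (PySem.List.pyRange 0 (t.length : Int) 1)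

-- ===== PORT B =====
-- 'if v == 0: has_zero[i] = True' inside 'for i, v in enumerate(row[:n])'
def pvBStep (h : List Bool) (p : Int × Int) : List Bool :=
  if p.2 == 0 then PySem.List.pySetD h p.1 true else h

-- 'row[:n]' is List.take n (n = len(t) ≥ 0, exact by PySem.List.slice_to_natCast);
-- '[False] * n' is List.replicate; 'all(has_zero)' is List.all
def check_column_for_0_alt (t : List (List Int)) : Bool :=
  (t.foldl
    (fun hz row => (PySem.List.enumerate (row.take t.length)).foldl pvBStep hz)
    (List.replicate t.length false)).all (fun b => b)

-- ===== PRECONDITION & SPEC =====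
-- 'column i's top-down scan finds a zero before any too-short row'
abbrev pvFound (t : List (List Int)) (i : Nat) : Prop :=
  ∃ j < t.length, (t.getD j []).getD i 1 = 0 ∧ ∀ j' ≤ j, i < (t.getD j' []).length
-- 'column i is fully in range and contains no zero' (A returns False here)
abbrev pvNoFind (t : List (List Int)) (i : Nat) : Prop :=
  ∀ j < t.length, i < (t.getD j []).length ∧ (t.getD j []).getD i 1 ≠ 0
-- Pre_ holds exactly when the Python A returns normally (no IndexError): every
-- column's top-down scan finds a zero safely, or the first column that does not
-- is fully in range (A returns False there); columns A never scans are unconstrained.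
def Pre_check_column_for_0 (t : List (List Int)) : Prop :=
  (∀ i < t.length, pvFound t i) ∨
  (∃ i < t.length, pvNoFind t i ∧ ∀ i' < i, pvFound t i')
instance (t : List (List Int)) : Decidable (Pre_check_column_for_0 t) := by
  unfold Pre_check_column_for_0; infer_instance
def pvWitness_check_column_for_0 : List (List Int) := [[1, 0], [0, 3]]

def Spec_check_column_for_0 (t : List (List Int)) (out : Bool) : Prop := out = check_column_for_0_alt t
instance (t : List (List Int)) (out : Bool) : Decidable (Spec_check_column_for_0 t out) := by unfold Spec_check_column_for_0; infer_instance

-- ===== CLAIM (what is proved, stated in full; the proofs are below) =====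
def Claim_equal_check_column_for_0 : Prop := ∀ (t : List (List Int)), Dom_check_column_for_0 t → Pre_check_column_for_0 t → Spec_check_column_for_0 t (check_column_for_0 t)
-- ===== LEMMAS AND PROOFS =====

theorem pvAFound_eq_any (t : List (List Int)) (i : Int) (js : List Int) :
    pvAFound t i js = js.any (fun j => PySem.List.pyGetD (PySem.List.pyGetD t j []) i 1 == 0) := by
  induction js with
  | nil => rfl
  | cons j js ih =>
      rw [pvAFound]
      split_ifs with h <;> simp [List.any_cons, h, ih]

theorem pvAOuter_eq_all (t : List (List Int)) (n : Int) (is : List Int) :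
    pvAOuter t n is = is.all (fun i => pvAFound t i (PySem.List.pyRange 0 n 1)) := by
  induction is with
  | nil => rfl
  | cons i is ih =>
      rw [pvAOuter]
      split_ifs with h <;> simp [List.all_cons, h, ih]

theorem check_column_for_0_eq_true (t : List (List Int)) :
    check_column_for_0 t = true ↔
      ∀ i ∈ PySem.List.pyRange 0 (t.length : Int) 1,
        ∃ row ∈ t, PySem.List.pyGetD row i 1 = 0 := by
  unfold check_column_for_0
  rw [pvAOuter_eq_all]
  simp only [List.all_eq_true]
  refine forall₂_congr (fun i hi => ?_)
  rw [pvAFound_eq_any]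
  rw [show (fun j => PySem.List.pyGetD (PySem.List.pyGetD t j []) i 1 == 0)
        = (fun row => PySem.List.pyGetD row i 1 == 0) ∘ (fun j => PySem.List.pyGetD t j []) from rfl,
      ← List.any_map, PySem.List.map_pyGetD_pyRange_zero']
  simp [List.any_eq_true]

theorem pvB_inner_length (l : List Int) (s : Int) (hz : List Bool) :
    ((PySem.List.enumerate l s).foldl pvBStep hz).length = hz.length := by
  induction l generalizing s hz with
  | nil => simp [PySem.List.enumerate_nil]
  | cons x xs ih =>
      rw [PySem.List.enumerate_cons, List.foldl_cons]
      rw [ih]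
      unfold pvBStep
      split_ifs <;> simp [PySem.List.length_pySetD]

theorem getD_set_true (hz : List Bool) (s k : Nat) :
    ((hz.set s true).getD k false = true) ↔ ((k = s ∧ s < hz.length) ∨ hz.getD k false = true) := by
  by_cases hks : k = s
  · subst hks
    by_cases hkl : k < hz.length
    · rw [List.getD_eq_getElem _ _ (by simpa using hkl), List.getElem_set_self]
      simp [hkl]
    · rw [List.getD_eq_default _ _ (by simpa using not_lt.mp hkl),
          List.getD_eq_default _ _ (not_lt.mp hkl)]
      simp; omega
  · rw [List.getD_eq_getElem?_getD, List.getElem?_set_ne (fun h => hks h.symm), ← List.getD_eq_getElem?_getD]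
    simp [hks]

theorem pvBStep_length (hz : List Bool) (p : Int × Int) : (pvBStep hz p).length = hz.length := by
  unfold pvBStep; split_ifs <;> simp [PySem.List.length_pySetD]

theorem pvBStep_getD_true (hz : List Bool) (s : Nat) (x : Int) (k : Nat) :
    ((pvBStep hz ((s : Int), x)).getD k false = true) ↔
      ((x = 0 ∧ k = s ∧ s < hz.length) ∨ hz.getD k false = true) := by
  unfold pvBStep
  split_ifs with hx
  · simp only [PySem.List.pySetD_natCast]
    rw [getD_set_true]
    have : x = 0 := by simpa using hx
    simp [this]
  · have : ¬ x = 0 := by simpa using hx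
    simp [this]

theorem pvB_inner_getD (l : List Int) (s : Nat) (hz : List Bool) (k : Nat) :
    ((PySem.List.enumerate l (s : Int)).foldl pvBStep hz).getD k false = true ↔
      hz.getD k false = true ∨ ∃ m < l.length, s + m = k ∧ k < hz.length ∧ l.getD m 1 = 0 := by
  induction l generalizing s hz with
  | nil => simp [PySem.List.enumerate_nil]
  | cons x xs ih =>
      rw [PySem.List.enumerate_cons, List.foldl_cons]
      have hcast : (s : Int) + 1 = ((s + 1 : Nat) : Int) := by push_cast; ring
      rw [hcast, ih]
      have hlen' : (pvBStep hz ((s : Int), x)).length = hz.length := pvBStep_length hz _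
      rw [hlen', pvBStep_getD_true]
      constructor
      · rintro ((⟨hx0, rfl, hs⟩ | hbase) | ⟨m, hm, hsm, hk, hz0⟩)
        · exact Or.inr ⟨0, by simp, by omega, by omega, by simpa using hx0⟩
        · exact Or.inl hbase
        · exact Or.inr ⟨m + 1, by simpa using Nat.succ_lt_succ hm, by omega, hk,
            by simpa [List.getD_cons_succ] using hz0⟩
      · rintro (hbase | ⟨m, hm, hsm, hk, hz0⟩)
        · exact Or.inl (Or.inr hbase)
        · match m, hsm with
          | 0, hsm =>
              exact Or.inl (Or.inl ⟨by simpa [List.getD_cons_zero] using hz0, by omega, by omega⟩)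
          | m + 1, hsm =>
              exact Or.inr ⟨m, by simpa using Nat.lt_of_succ_lt_succ (by simpa using hm),
                by omega, hk, by simpa [List.getD_cons_succ] using hz0⟩

theorem pvB_outer_length (n : Nat) (rows : List (List Int)) (hz : List Bool) :
    ((rows.foldl
        (fun hz row => (PySem.List.enumerate (row.take n)).foldl pvBStep hz) hz).length)
      = hz.length := by
  induction rows generalizing hz with
  | nil => rfl
  | cons row rows ih => rw [List.foldl_cons, ih, pvB_inner_length]

theorem pvB_outer_getD (n : Nat) (rows : List (List Int)) (hz : List Bool)
    (hlen : hz.length = n) (k : Nat) :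
    ((rows.foldl
        (fun hz row => (PySem.List.enumerate (row.take n)).foldl pvBStep hz) hz).getD k false = true) ↔
      hz.getD k false = true ∨ ∃ row ∈ rows, k < n ∧ k < row.length ∧ row.getD k 1 = 0 := by
  induction rows generalizing hz with
  | nil => simp
  | cons row rows ih =>
      rw [List.foldl_cons]
      have hlen' : ((PySem.List.enumerate (row.take n) (0:Int)).foldl pvBStep hz).length = n := by
        rw [pvB_inner_length]; exact hlen
      rw [ih _ hlen']
      have h0 : ((0:Nat) : Int) = (0:Int) := rfl
      rw [← h0, pvB_inner_getD]
      constructor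
      · rintro ((hbase | ⟨m, hm, hsm, hk, hz0⟩) | ⟨r, hr, hkn, hkr, hr0⟩)
        · exact Or.inl hbase
        · right
          have hkm : k = m := by omega
          subst hkm
          have hkt : k < (row.take n).length := hm
          have hkt' : k < n ∧ k < row.length := by simpa using hkt
          refine ⟨row, List.mem_cons_self, hkt'.1, hkt'.2, ?_⟩
          rw [List.getD_eq_getElem _ _ hkt] at hz0
          rw [List.getD_eq_getElem _ _ hkt'.2]
          simpa [List.getElem_take] using hz0
        · exact Or.inr ⟨r, List.mem_cons_of_mem _ hr, hkn, hkr, hr0⟩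
      · rintro (hbase | ⟨r, hr, hkn, hkr, hr0⟩)
        · exact Or.inl (Or.inl hbase)
        · rcases List.mem_cons.mp hr with rfl | hr'
          · left; right
            refine ⟨k, by simp; omega, by omega, by omega, ?_⟩
            rw [List.getD_eq_getElem _ _ (by simp; omega)]
            rw [List.getD_eq_getElem _ _ hkr] at hr0
            simpa [List.getElem_take] using hr0
          · exact Or.inr ⟨r, hr', hkn, hkr, hr0⟩

theorem check_column_for_0_alt_eq_true (t : List (List Int)) :
    check_column_for_0_alt t = true ↔
      ∀ k < t.length, ∃ row ∈ t, k < row.length ∧ row.getD k 1 = 0 := by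
  unfold check_column_for_0_alt
  set n := t.length with hn
  have hflen : ((t.foldl
      (fun hz row => (PySem.List.enumerate (row.take n)).foldl pvBStep hz)
      (List.replicate n false)).length = n) := by
    rw [pvB_outer_length]; simp
  rw [List.all_eq_true]
  constructor
  · intro h k hk
    have hmem : (t.foldl
        (fun hz row => (PySem.List.enumerate (row.take n)).foldl pvBStep hz)
        (List.replicate n false)).getD k false = true := by
      rw [List.getD_eq_getElem _ _ (by omega : k < _)]
      · exact h _ (List.getElem_mem _)
    have := (pvB_outer_getD n t (List.replicate n false) (by simp) k).mp hmem
    rcases this with hbase | ⟨row, hrow, _, hkr, hr0⟩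
    · simp at hbase
    · exact ⟨row, hrow, hkr, hr0⟩
  · intro h b hb
    obtain ⟨k, hk, rfl⟩ := List.getElem_of_mem hb
    have hkn : k < n := by omega
    obtain ⟨row, hrow, hkr, hr0⟩ := h k hkn
    have := (pvB_outer_getD n t (List.replicate n false) (by simp) k).mpr
      (Or.inr ⟨row, hrow, hkn, hkr, hr0⟩)
    rw [List.getD_eq_getElem _ _ (by omega : k < _)] at this
    exact this

-- ===== VERDICT (by name: the statements are the Claim_ definitions above) =====
theorem check_column_for_0_spec : Claim_equal_check_column_for_0 := by
  intro t _ _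
  unfold Spec_check_column_for_0
  rw [Bool.eq_iff_iff, check_column_for_0_eq_true, check_column_for_0_alt_eq_true]
  constructor
  · intro h k hk
    obtain ⟨row, hrow, h0⟩ := h (k : Int)
      (by rw [PySem.List.mem_pyRange_one]; constructor <;> [positivity; exact_mod_cast hk])
    rw [PySem.List.pyGetD_natCast] at h0
    have hkr : k < row.length := by
      by_contra hge
      rw [List.getD_eq_default _ _ (by omega)] at h0
      exact one_ne_zero h0
    exact ⟨row, hrow, hkr, h0⟩
  · intro h i hi
    rw [PySem.List.mem_pyRange_one] at hi
    obtain ⟨h0, hlt⟩ := hi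
    obtain ⟨k, rfl⟩ := Int.eq_ofNat_of_zero_le h0
    obtain ⟨row, hrow, _, hr0⟩ := h k (by exact_mod_cast hlt)
    exact ⟨row, hrow, by rw [PySem.List.pyGetD_natCast]; exact hr0⟩
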